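-- pv_equiv track=rewrite | github.com/rlagusgh0223/Algorithm | 221127/14888, 연산자 끼워넣기.py | calc
-- ===== SOURCE A (Python) =====
-- def calc(a, index, cur, plus, minus, mul, div):
--     if len(a) == index:
--         return cur, cur
--     res = []
--     if plus > 0:
--         res.append(calc(a, index+1, cur+a[index], plus-1, minus, mul, div))
--     if minus > 0:
--         res.append(calc(a, index+1, cur-a[index], plus, minus-1, mul, div))
--     if mul > 0:
--         res.append(calc(a, index+1, cur*a[index], plus, minus, mul-1, div))
--     if div > 0:
--         if cur >= 0:
--             res.append(calc(a, index+1, cur//a[index], plus, minus, mul, div-1))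
--         else:
--             res.append(calc(a, index+1, -(-cur//a[index]), plus, minus, mul, div-1))
--     ans = (
--         max(t[0] for t in res),
--         min(t[1] for t in res)
--     )
--     return ans
-- ===== SOURCE B (Python) =====
-- def calc(a, index, cur, plus, minus, mul, div):
--     states = [(cur, plus, minus, mul, div)]
--     for i in range(index, len(a)):
--         x = a[i]
--         nxt = []
--         for (c, p, m, u, d) in states:
--             if p > 0:
--                 nxt.append((c + x, p - 1, m, u, d))
--             if m > 0:
--                 nxt.append((c - x, p, m - 1, u, d))
--             if u > 0:
--                 nxt.append((c * x, p, m, u - 1, d))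
--             if d > 0:
--                 nxt.append((c // x if c >= 0 else -(-c // x), p, m, u, d - 1))
--         states = nxt
--     vals = [s[0] for s in states]
--     return max(vals), min(vals)
-- ===== Notes on version B (the rewrite author's own statement) =====
-- stated objective: alternative
-- what changed: Replaced A's depth-first tree recursion (each node combining its children's (max,min) pairs) by an iterative breadth-first frontier: a list of (value, remaining-operator-counts) states is expanded once per list position and max/min are taken once over the final values.
import Mathlib
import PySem

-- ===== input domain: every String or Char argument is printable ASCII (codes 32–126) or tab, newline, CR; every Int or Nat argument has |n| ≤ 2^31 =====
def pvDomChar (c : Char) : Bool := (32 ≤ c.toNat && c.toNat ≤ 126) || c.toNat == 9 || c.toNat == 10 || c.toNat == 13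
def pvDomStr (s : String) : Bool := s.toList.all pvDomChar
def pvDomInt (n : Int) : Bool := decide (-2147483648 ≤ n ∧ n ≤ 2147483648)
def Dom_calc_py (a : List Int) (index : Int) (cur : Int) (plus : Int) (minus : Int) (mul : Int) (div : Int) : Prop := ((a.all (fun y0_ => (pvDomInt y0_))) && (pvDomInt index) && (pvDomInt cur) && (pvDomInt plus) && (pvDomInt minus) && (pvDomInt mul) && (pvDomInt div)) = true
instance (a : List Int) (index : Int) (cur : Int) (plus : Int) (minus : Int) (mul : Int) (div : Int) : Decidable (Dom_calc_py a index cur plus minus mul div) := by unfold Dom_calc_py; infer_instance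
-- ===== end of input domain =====

-- B replaces A's tree recursion by an iterative level-by-level frontier expansion (a list of
-- (value, remaining-operator-count) states per position), taking max/min once at the end:
-- a different decomposition of the same exhaustive search (objective: alternative, not faster).

-- ===== PORT A =====
-- literal transliteration of A's recursion (where Python raises — IndexError, ZeroDivisionError,
-- max() of an empty list — the port returns a default; such inputs are excluded by Pre_calc_py)
def calc_py (a : List Int) (index : Int) (cur : Int) (plus : Int) (minus : Int) (mul : Int) (div : Int) : Int × Int :=
  if (a.length : Int) = index then (cur, cur)
  else
    match h : PySem.List.pyGet? a index with
    | none => (0, 0)  -- Python: IndexError (outside Pre_calc_py)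
    | some x =>
      let res0 : List (Int × Int) := []
      let res1 := if plus > 0 then res0 ++ [calc_py a (index+1) (cur+x) (plus-1) minus mul div] else res0
      let res2 := if minus > 0 then res1 ++ [calc_py a (index+1) (cur-x) plus (minus-1) mul div] else res1
      let res3 := if mul > 0 then res2 ++ [calc_py a (index+1) (cur*x) plus minus (mul-1) div] else res2
      let res4 := if div > 0 then
          res3 ++ [if cur ≥ 0 then calc_py a (index+1) (PySem.Int.floordiv cur x) plus minus mul (div-1)
                   else calc_py a (index+1) (-(PySem.Int.floordiv (-cur) x)) plus minus mul (div-1)]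
        else res3
      match res4 with
      | [] => (0, 0)  -- Python: ValueError from max() on empty (outside Pre_calc_py)
      | r :: rs => ((rs.map Prod.fst).foldl max r.1, (rs.map Prod.snd).foldl min r.2)
termination_by (a.length - index).toNat
decreasing_by
  all_goals
    have hb := PySem.List.pyGet?_eq_none_iff (xs := a) (i := index)
    rw [h] at hb
    simp [PySem.Raise.InRange] at hb
    omega

-- ===== PORT B =====
-- one state = (current value, remaining plus, minus, mul, div)
def pvBranch (x : Int) (st : Int × Int × Int × Int × Int) : List (Int × Int × Int × Int × Int) :=
  match st with
  | (c, p, m, u, d) =>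
    (if p > 0 then [(c + x, p - 1, m, u, d)] else []) ++
    (if m > 0 then [(c - x, p, m - 1, u, d)] else []) ++
    (if u > 0 then [(c * x, p, m, u - 1, d)] else []) ++
    (if d > 0 then [((if c ≥ 0 then PySem.Int.floordiv c x else -(PySem.Int.floordiv (-c) x)), p, m, u, d - 1)] else [])

def pvStep (x : Int) (sts : List (Int × Int × Int × Int × Int)) : List (Int × Int × Int × Int × Int) :=
  sts.flatMap (pvBranch x)

def calc_py_alt (a : List Int) (index : Int) (cur : Int) (plus : Int) (minus : Int) (mul : Int) (div : Int) : Int × Int :=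
  let states := (PySem.List.pyRange index (a.length : Int) 1).foldl
      (fun sts i => pvStep (PySem.List.pyGetD a i 0) sts) [(cur, plus, minus, mul, div)]
  match states.map (fun s => s.1) with
  | [] => (0, 0)  -- Python: ValueError from max() on empty (outside Pre_calc_py)
  | v :: vs => (vs.foldl max v, vs.foldl min v)

-- ===== PRECONDITION & SPEC =====
-- Exactly the inputs on which Python A returns: index within Python's valid range, enough
-- available operators to reach the end of the list (otherwise a[index] raises IndexError or
-- max() of an empty list raises ValueError), and, when division is available, no zero among
-- the scanned elements (otherwise an evaluated division branch raises ZeroDivisionError).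
def Pre_calc_py (a : List Int) (index : Int) (cur : Int) (plus : Int) (minus : Int) (mul : Int) (div : Int) : Prop :=
  -(a.length : Int) ≤ index ∧ index ≤ (a.length : Int) ∧
  max plus 0 + max minus 0 + max mul 0 + max div 0 ≥ (a.length : Int) - index ∧
  (div > 0 → (0 : Int) ∉ a.drop index.toNat)
instance (a : List Int) (index : Int) (cur : Int) (plus : Int) (minus : Int) (mul : Int) (div : Int) : Decidable (Pre_calc_py a index cur plus minus mul div) := by unfold Pre_calc_py; infer_instance

def pvWitness_calc_py : List Int × Int × Int × Int × Int × Int × Int := ([1, 2], 0, 0, 1, 1, 0, 0)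

def Spec_calc_py (a : List Int) (index : Int) (cur : Int) (plus : Int) (minus : Int) (mul : Int) (div : Int) (out : Int × Int) : Prop := out = calc_py_alt a index cur plus minus mul div
instance (a : List Int) (index : Int) (cur : Int) (plus : Int) (minus : Int) (mul : Int) (div : Int) (out : Int × Int) : Decidable (Spec_calc_py a index cur plus minus mul div out) := by unfold Spec_calc_py; infer_instance

-- ===== CLAIM (what is proved, stated in full; the proofs are below) =====
def Claim_equal_calc_py : Prop := ∀ (a : List Int) (index : Int) (cur : Int) (plus : Int) (minus : Int) (mul : Int) (div : Int), Dom_calc_py a index cur plus minus mul div → Pre_calc_py a index cur plus minus mul div → Spec_calc_py a index cur plus minus mul div (calc_py a index cur plus minus mul div)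

-- ===== LEMMAS AND PROOFS =====

-- max/min of a value list, seeded with its head (exactly how both ports reduce a nonempty list)
def pvM : List Int → Int
  | [] => 0
  | v :: vs => vs.foldl max v
def pvMn : List Int → Int
  | [] => 0
  | v :: vs => vs.foldl min v

-- positive parts of the four operator counters
def pvS (st : Int × Int × Int × Int × Int) : Int :=
  max st.2.1 0 + max st.2.2.1 0 + max st.2.2.2.1 0 + max st.2.2.2.2 0

-- the element sequence A scans: a[index], a[index+1], …, a[len-1] (Python wraps a negative i)
def pvEs (a : List Int) (index : Int) : List Int :=
  (PySem.List.pyRange index (a.length : Int) 1).map (fun i => PySem.List.pyGetD a i 0)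

-- A's recursion rewritten over the scanned element list (bridge object, used only in proofs)
def pvCalcE : List Int → Int → Int → Int → Int → Int → Int × Int
  | [], cur, _, _, _, _ => (cur, cur)
  | x :: es, cur, plus, minus, mul, div =>
    let res0 : List (Int × Int) := []
    let res1 := if plus > 0 then res0 ++ [pvCalcE es (cur+x) (plus-1) minus mul div] else res0
    let res2 := if minus > 0 then res1 ++ [pvCalcE es (cur-x) plus (minus-1) mul div] else res1
    let res3 := if mul > 0 then res2 ++ [pvCalcE es (cur*x) plus minus (mul-1) div] else res2
    let res4 := if div > 0 then
        res3 ++ [if cur ≥ 0 then pvCalcE es (PySem.Int.floordiv cur x) plus minus mul (div-1)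
                 else pvCalcE es (-(PySem.Int.floordiv (-cur) x)) plus minus mul (div-1)]
      else res3
    match res4 with
    | [] => (0, 0)
    | r :: rs => ((rs.map Prod.fst).foldl max r.1, (rs.map Prod.snd).foldl min r.2)

lemma pvFoldl_max_shift (v y : Int) (l : List Int) :
    l.foldl max (max v y) = max v (l.foldl max y) := by
  induction l generalizing y with
  | nil => simp
  | cons z l ih => simp only [List.foldl_cons, max_assoc, ih]

lemma pvFoldl_min_shift (v y : Int) (l : List Int) :
    l.foldl min (min v y) = min v (l.foldl min y) := by
  induction l generalizing y with
  | nil => simp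
  | cons z l ih => simp only [List.foldl_cons, min_assoc, ih]

lemma pvM_cons (v : Int) (l : List Int) (h : l ≠ []) : pvM (v :: l) = max v (pvM l) := by
  obtain ⟨y, ys, rfl⟩ := List.exists_cons_of_ne_nil h
  simp [pvM, pvFoldl_max_shift]

lemma pvMn_cons (v : Int) (l : List Int) (h : l ≠ []) : pvMn (v :: l) = min v (pvMn l) := by
  obtain ⟨y, ys, rfl⟩ := List.exists_cons_of_ne_nil h
  simp [pvMn, pvFoldl_min_shift]

lemma pvM_append (l1 l2 : List Int) (h1 : l1 ≠ []) (h2 : l2 ≠ []) :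
    pvM (l1 ++ l2) = max (pvM l1) (pvM l2) := by
  induction l1 with
  | nil => simp at h1
  | cons v vs ih =>
    by_cases hvs : vs = []
    · subst hvs
      rw [List.singleton_append, pvM_cons v l2 h2]
      rfl
    · rw [List.cons_append, pvM_cons v (vs ++ l2) (by simp [hvs]), ih hvs,
        pvM_cons v vs hvs, max_assoc]

lemma pvMn_append (l1 l2 : List Int) (h1 : l1 ≠ []) (h2 : l2 ≠ []) :
    pvMn (l1 ++ l2) = min (pvMn l1) (pvMn l2) := by
  induction l1 with
  | nil => simp at h1
  | cons v vs ih =>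
    by_cases hvs : vs = []
    · subst hvs
      rw [List.singleton_append, pvMn_cons v l2 h2]
      rfl
    · rw [List.cons_append, pvMn_cons v (vs ++ l2) (by simp [hvs]), ih hvs,
        pvMn_cons v vs hvs, min_assoc]

-- the frontier after consuming es, starting from a list of states
def pvFinals (es : List Int) (sts : List (Int × Int × Int × Int × Int)) :
    List (Int × Int × Int × Int × Int) :=
  es.foldl (fun s x => pvStep x s) sts

lemma pvStep_append (x : Int) (l1 l2 : List (Int × Int × Int × Int × Int)) :
    pvStep x (l1 ++ l2) = pvStep x l1 ++ pvStep x l2 := by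
  simp [pvStep]

lemma pvFinals_append (es : List Int) (l1 l2 : List (Int × Int × Int × Int × Int)) :
    pvFinals es (l1 ++ l2) = pvFinals es l1 ++ pvFinals es l2 := by
  induction es generalizing l1 l2 with
  | nil => rfl
  | cons x es ih =>
    show pvFinals es (pvStep x (l1 ++ l2)) = pvFinals es (pvStep x l1) ++ pvFinals es (pvStep x l2)
    rw [pvStep_append, ih]

lemma pvFinals_cons (x : Int) (es : List Int) (sts : List (Int × Int × Int × Int × Int)) :
    pvFinals (x :: es) sts = pvFinals es (pvStep x sts) := rfl

lemma pvMemIte {α : Type} (a : α) (c : Prop) [Decidable c] (t : List α)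
    (h : a ∈ if c then t else []) : c ∧ a ∈ t := by
  by_cases hc : c <;> simp [hc] at h ⊢ <;> exact h

lemma pvBranch_S (x : Int) (st st' : Int × Int × Int × Int × Int) (h : st' ∈ pvBranch x st) :
    pvS st' = pvS st - 1 := by
  obtain ⟨c, p, m, u, d⟩ := st
  obtain ⟨c', p', m', u', d'⟩ := st'
  simp only [pvBranch, List.mem_append] at h
  rcases h with ((h | h) | h) | h <;>
    · obtain ⟨hc, h⟩ := pvMemIte _ _ _ h
      simp only [List.mem_singleton, Prod.mk.injEq] at h
      obtain ⟨-, h2, h3, h4, h5⟩ := h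
      subst h2; subst h3; subst h4; subst h5
      simp only [pvS]
      omega

lemma pvBranch_ne (x : Int) (st : Int × Int × Int × Int × Int) (h : 1 ≤ pvS st) :
    pvBranch x st ≠ [] := by
  obtain ⟨c, p, m, u, d⟩ := st
  intro hnil
  simp only [pvS] at h
  simp only [pvBranch, List.append_eq_nil_iff] at hnil
  obtain ⟨⟨⟨h1, h2⟩, h3⟩, h4⟩ := hnil
  by_cases hp : p > 0
  · simp [hp] at h1
  · by_cases hm : m > 0
    · simp [hm] at h2
    · by_cases hu : u > 0
      · simp [hu] at h3
      · by_cases hd : d > 0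
        · simp [hd] at h4
        · omega

-- pvCalcE's res-chain is the map of pvCalcE over pvBranch
lemma pvCalcE_cons (x : Int) (es : List Int) (c p m u d : Int) :
    pvCalcE (x :: es) c p m u d =
      match (pvBranch x (c, p, m, u, d)).map
          (fun st => pvCalcE es st.1 st.2.1 st.2.2.1 st.2.2.2.1 st.2.2.2.2) with
      | [] => (0, 0)
      | r :: rs => ((rs.map Prod.fst).foldl max r.1, (rs.map Prod.snd).foldl min r.2) := by
  rw [pvCalcE, pvBranch]
  split_ifs <;> simp_all

-- combine a nonempty list of states whose subtrees are already characterised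
lemma pvAux (es : List Int) (sts : List (Int × Int × Int × Int × Int)) (hne : sts ≠ [])
    (hall : ∀ st ∈ sts, pvFinals es [st] ≠ [] ∧
        pvCalcE es st.1 st.2.1 st.2.2.1 st.2.2.2.1 st.2.2.2.2 =
          (pvM ((pvFinals es [st]).map (fun s => s.1)), pvMn ((pvFinals es [st]).map (fun s => s.1)))) :
    pvFinals es sts ≠ [] ∧
    pvM ((sts.map (fun st => pvCalcE es st.1 st.2.1 st.2.2.1 st.2.2.2.1 st.2.2.2.2)).map Prod.fst)
      = pvM ((pvFinals es sts).map (fun s => s.1)) ∧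
    pvMn ((sts.map (fun st => pvCalcE es st.1 st.2.1 st.2.2.1 st.2.2.2.1 st.2.2.2.2)).map Prod.snd)
      = pvMn ((pvFinals es sts).map (fun s => s.1)) := by
  induction sts with
  | nil => simp at hne
  | cons st rest ih =>
    obtain ⟨hfne, hst⟩ := hall st (by simp)
    by_cases hrest : rest = []
    · subst hrest
      refine ⟨by simpa [pvFinals_append] using hfne, ?_, ?_⟩ <;>
        simp [pvM, pvMn, hst]
    · obtain ⟨hfne2, hM, hMn⟩ := ih hrest (fun s hs => hall s (by simp [hs]))
      have hsplit : pvFinals es (st :: rest) = pvFinals es [st] ++ pvFinals es rest := by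
        simpa using pvFinals_append es [st] rest
      have hmapne : ((rest.map (fun st => pvCalcE es st.1 st.2.1 st.2.2.1 st.2.2.2.1 st.2.2.2.2)).map Prod.fst) ≠ [] := by
        simp [hrest]
      have hmapne2 : ((rest.map (fun st => pvCalcE es st.1 st.2.1 st.2.2.1 st.2.2.2.1 st.2.2.2.2)).map Prod.snd) ≠ [] := by
        simp [hrest]
      have hvne : (pvFinals es [st]).map (fun s => s.1) ≠ [] := by simp [hfne]
      have hvne2 : (pvFinals es rest).map (fun s => s.1) ≠ [] := by simp [hfne2]
      refine ⟨by simp [hsplit, hfne2], ?_, ?_⟩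
      · rw [List.map_cons, List.map_cons, pvM_cons _ _ hmapne, hM, hst, hsplit, List.map_append,
          pvM_append _ _ hvne hvne2]
      · rw [List.map_cons, List.map_cons, pvMn_cons _ _ hmapne2, hMn, hst, hsplit, List.map_append,
          pvMn_append _ _ hvne hvne2]

-- core invariant: over the scanned list, A's recursion computes (max, min) of B's frontier values
lemma pvCore (es : List Int) (st : Int × Int × Int × Int × Int)
    (h : (es.length : Int) ≤ pvS st) :
    pvFinals es [st] ≠ [] ∧
    pvCalcE es st.1 st.2.1 st.2.2.1 st.2.2.2.1 st.2.2.2.2 =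
      (pvM ((pvFinals es [st]).map (fun s => s.1)), pvMn ((pvFinals es [st]).map (fun s => s.1))) := by
  induction es generalizing st with
  | nil =>
    obtain ⟨c, p, m, u, d⟩ := st
    simp [pvFinals, pvCalcE, pvM, pvMn]
  | cons x es ih =>
    obtain ⟨c, p, m, u, d⟩ := st
    have hlen : (es.length : Int) + 1 ≤ pvS (c, p, m, u, d) := by
      have := h; simp only [List.length_cons] at this; push_cast at this; omega
    have hbne : pvBranch x (c, p, m, u, d) ≠ [] := pvBranch_ne x _ (by omega)
    have hall : ∀ st' ∈ pvBranch x (c, p, m, u, d), pvFinals es [st'] ≠ [] ∧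
        pvCalcE es st'.1 st'.2.1 st'.2.2.1 st'.2.2.2.1 st'.2.2.2.2 =
          (pvM ((pvFinals es [st']).map (fun s => s.1)), pvMn ((pvFinals es [st']).map (fun s => s.1))) := by
      intro st' hmem
      have hS := pvBranch_S x _ _ hmem
      exact ih st' (by omega)
    obtain ⟨hfne, hM, hMn⟩ := pvAux es _ hbne hall
    have hstep : pvStep x [(c, p, m, u, d)] = pvBranch x (c, p, m, u, d) := by
      simp [pvStep]
    constructor
    · rw [pvFinals_cons, hstep]; exact hfne
    · rw [pvCalcE_cons, pvFinals_cons, hstep]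
      dsimp only
      rcases hmap : (pvBranch x (c, p, m, u, d)).map
          (fun st => pvCalcE es st.1 st.2.1 st.2.2.1 st.2.2.2.1 st.2.2.2.2) with _ | ⟨r, rs⟩
      · exact absurd (List.map_eq_nil_iff.mp hmap) hbne
      · rw [hmap] at hM hMn
        simp only [List.map_cons] at hM hMn
        rw [hmap]
        exact Prod.ext_iff.mpr ⟨hM, hMn⟩

-- bridge A: within Python's index range, calc_py is pvCalcE on the scanned element list
lemma pvBridgeA (k : Nat) : ∀ (a : List Int) (index c p m u d : Int),
    ((a.length : Int) - index).toNat = k → -(a.length : Int) ≤ index → index ≤ (a.length : Int) →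
    calc_py a index c p m u d = pvCalcE (pvEs a index) c p m u d := by
  induction k with
  | zero =>
    intro a index c p m u d hk h1 h2
    have hix : index = (a.length : Int) := by omega
    rw [calc_py, pvEs, PySem.List.pyRange_one_eq_nil (by omega)]
    simp [hix, pvCalcE]
  | succ k ih =>
    intro a index c p m u d hk h1 h2
    have hlt : index < (a.length : Int) := by omega
    have hne : ¬ ((a.length : Int) = index) := by omega
    have hsome : PySem.List.pyGet? a index = some (PySem.List.pyGetD a index 0) := by
      have hin : PySem.Raise.InRange a.length index := by
        simp [PySem.Raise.InRange]; omega
      rcases hx : PySem.List.pyGet? a index with _ | x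
      · exact absurd ((PySem.List.pyGet?_eq_none_iff a index).mp hx) (not_not_intro hin)
      · have hgd : PySem.List.pyGetD a index 0 = x := by
          simp [PySem.List.pyGetD, hx]
        rw [hgd]
    have hcons : pvEs a index = PySem.List.pyGetD a index 0 :: pvEs a (index + 1) := by
      rw [pvEs, PySem.List.pyRange_one_cons hlt, List.map_cons, pvEs]
    rw [calc_py, if_neg hne]
    split
    · next heq => rw [hsome] at heq; exact absurd heq (by simp)
    · next x heq =>
      rw [hsome] at heq
      have hx2 : x = PySem.List.pyGetD a index 0 := (Option.some.inj heq).symm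
      subst hx2
      rw [hcons, pvCalcE]
      dsimp only
      rw [ih a (index+1) (c + PySem.List.pyGetD a index 0) (p-1) m u d (by omega) (by omega) (by omega),
          ih a (index+1) (c - PySem.List.pyGetD a index 0) p (m-1) u d (by omega) (by omega) (by omega),
          ih a (index+1) (c * PySem.List.pyGetD a index 0) p m (u-1) d (by omega) (by omega) (by omega),
          ih a (index+1) (PySem.Int.floordiv c (PySem.List.pyGetD a index 0)) p m u (d-1) (by omega) (by omega) (by omega),
          ih a (index+1) (-(PySem.Int.floordiv (-c) (PySem.List.pyGetD a index 0))) p m u (d-1) (by omega) (by omega) (by omega)]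

-- bridge B: calc_py_alt computes max/min of the frontier values over the scanned list
lemma pvBridgeB (a : List Int) (index c p m u d : Int) :
    calc_py_alt a index c p m u d =
      match (pvFinals (pvEs a index) [(c, p, m, u, d)]).map (fun s => s.1) with
      | [] => (0, 0)
      | v :: vs => (vs.foldl max v, vs.foldl min v) := by
  rw [calc_py_alt, pvFinals, pvEs, List.foldl_map]

-- ===== VERDICT (by name: the statement is the Claim_ definition above) =====
theorem calc_py_spec : Claim_equal_calc_py := by
  intro a index cur plus minus mul div _ hpre
  obtain ⟨h1, h2, h3, _⟩ := hpre
  unfold Spec_calc_py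
  have hlen : ((pvEs a index).length : Int) = (a.length : Int) - index := by
    rw [pvEs, List.length_map, PySem.List.length_pyRange_one]
    omega
  have hS : ((pvEs a index).length : Int) ≤ pvS (cur, plus, minus, mul, div) := by
    simp only [pvS]; omega
  obtain ⟨hfne, hcalc⟩ := pvCore (pvEs a index) (cur, plus, minus, mul, div) hS
  rw [pvBridgeA (((a.length : Int) - index).toNat) a index cur plus minus mul div rfl h1 h2,
      pvBridgeB]
  rcases hmap : (pvFinals (pvEs a index) [(cur, plus, minus, mul, div)]).map (fun s => s.1)
      with _ | ⟨v, vs⟩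
  · exact absurd (List.map_eq_nil_iff.mp hmap) hfne
  · simp only [hcalc, hmap, pvM, pvMn]
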